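-- pv_equiv track=rewrite | github.com/varvaracaraus/my_python_journey | python_basics_part_2/16_methods_to_work_with_lists/16_08_missing_palindrome_number_finder.py | find_missing_palindrome_numbers
-- ===== SOURCE A (Python) =====
-- def find_missing_palindrome_numbers(input_sequence: list) -> list:
--     """
--     Identifies numbers that need to be added at the start of a sequence to form a palindrome.
--
--     Args:
--         input_sequence (list): The sequence of numbers to check.
--
--     Returns:
--         list: A list of numbers that need to be added to make the sequence a palindrome.
--     """
--     missing_numbers = []
--     for start_index in range(len(input_sequence)):
--         is_palindrome_possible = True
--         for current_index in range(start_index, len(input_sequence)):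
--             left_index = current_index
--             right_index = len(input_sequence) - current_index + start_index - 1
--             if left_index >= right_index:
--                 break
--             if input_sequence[left_index] != input_sequence[right_index]:
--                 is_palindrome_possible = False
--                 break
--
--         if is_palindrome_possible:
--             for idx in range(start_index):
--                 missing_numbers.append(input_sequence[start_index - 1 - idx])
--             break
--
--     return missing_numbers
-- ===== SOURCE B (Python) =====
-- def find_missing_palindrome_numbers(input_sequence: list) -> list:
--     """Numbers to prepend so the sequence becomes a palindrome (KMP, O(n))."""
--     rev = input_sequence[::-1]
--     combined = rev + [None] + input_sequence
--     fail = [0] * len(combined)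
--     k = 0
--     for i in range(1, len(combined)):
--         while k > 0 and combined[i] != combined[k]:
--             k = fail[k - 1]
--         if combined[i] == combined[k]:
--             k += 1
--         fail[i] = k
--     return rev[fail[-1]:]
-- ===== Notes on version B (the rewrite author's own statement) =====
-- stated objective: faster
-- what changed: A's nested scan that re-checks every suffix for palindromicity is replaced by one KMP failure-function pass over reversed(seq) + [None] + seq, whose final failure value is the length of the longest palindromic suffix; B returns the reversed prefix before it.
import Mathlib
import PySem

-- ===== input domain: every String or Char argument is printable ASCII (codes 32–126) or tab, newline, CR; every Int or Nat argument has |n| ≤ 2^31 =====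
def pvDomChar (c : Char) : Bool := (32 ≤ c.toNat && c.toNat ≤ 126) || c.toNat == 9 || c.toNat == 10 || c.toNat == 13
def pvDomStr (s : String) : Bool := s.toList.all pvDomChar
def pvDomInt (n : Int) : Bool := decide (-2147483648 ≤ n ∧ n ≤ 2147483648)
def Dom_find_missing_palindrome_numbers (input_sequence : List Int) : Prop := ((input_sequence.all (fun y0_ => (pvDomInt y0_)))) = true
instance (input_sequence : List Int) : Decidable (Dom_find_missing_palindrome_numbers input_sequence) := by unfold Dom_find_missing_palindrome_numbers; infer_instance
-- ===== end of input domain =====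

-- B replaces A's quadratic scan of suffixes by a single KMP failure-function pass over
-- reversed(seq) + [None] + seq: the last failure value is the longest palindromic suffix (objective: faster).
-- ===== PORT A =====
-- inner 'for current_index' loop of A (breaks ported as returns)
def pvAInner (seq : List Int) (n s ci : Int) : Bool :=
  if _h : ci < n then
    let l := ci
    let r := n - ci + s - 1
    if l ≥ r then true
    else if PySem.List.pyGetD seq l 0 ≠ PySem.List.pyGetD seq r 0 then false
    else pvAInner seq n s (ci + 1)
  else true
termination_by (n - ci).toNat
decreasing_by omega

-- outer 'for start_index' loop of A; missing_numbers is only filled right before the final break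
def pvAOuter (seq : List Int) (n s : Int) : List Int :=
  if _h : s < n then
    if pvAInner seq n s s then
      (PySem.List.pyRange 0 s 1).foldl
        (fun acc idx => acc ++ [PySem.List.pyGetD seq (s - 1 - idx) 0]) []
    else pvAOuter seq n (s + 1)
  else []
termination_by (n - s).toNat
decreasing_by omega

def find_missing_palindrome_numbers (input_sequence : List Int) : List Int :=
  pvAOuter input_sequence input_sequence.length 0

-- ===== PORT B =====
-- the 'while k > 0 and combined[i] != combined[k]' loop of Source B; k strictly decreases each
-- iteration (failure values are smaller than their index), so fuel k.toNat never runs out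
def pvShrink (fail : List Int) (c : List (Option Int)) (x : Option Int) : Int → Nat → Int
  | k, 0 => k
  | k, fuel + 1 =>
    if 0 < k ∧ PySem.List.pyGetD c k none ≠ x then
      pvShrink fail c x (PySem.List.pyGetD fail (k - 1) 0) fuel
    else k

-- body of one iteration of Source B's 'for i in range(1, len(combined))' loop
def pvStepK (c : List (Option Int)) (fail : List Int) (k : Int) (i : Nat) : Int :=
  let x := PySem.List.pyGetD c (i : Int) none
  let k1 := pvShrink fail c x k k.toNat
  if PySem.List.pyGetD c k1 none = x then k1 + 1 else k1

-- the failure-function loop itself: fail[i] = k after each iteration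
def pvKmp (c : List (Option Int)) (fail : List Int) (k : Int) (i : Nat) : List Int :=
  if _h : i < c.length then
    pvKmp c (fail.set i (pvStepK c fail k i)) (pvStepK c fail k i) (i + 1)
  else fail
termination_by c.length - i

def find_missing_palindrome_numbers_alt (input_sequence : List Int) : List Int :=
  let rev := input_sequence.reverse
  let combined := rev.map some ++ [none] ++ input_sequence.map some
  let fail := pvKmp combined (List.replicate combined.length 0) 0 1
  PySem.List.slice rev (some (PySem.List.pyGetD fail (-1) 0)) none

-- ===== PRECONDITION & SPEC =====
def Spec_find_missing_palindrome_numbers (input_sequence : List Int) (out : List Int) : Prop := out = find_missing_palindrome_numbers_alt input_sequence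
instance (input_sequence : List Int) (out : List Int) : Decidable (Spec_find_missing_palindrome_numbers input_sequence out) := by unfold Spec_find_missing_palindrome_numbers; infer_instance

-- ===== CLAIM (what is proved, stated in full; the proofs are below) =====
def Claim_equal_find_missing_palindrome_numbers : Prop := ∀ (input_sequence : List Int), Dom_find_missing_palindrome_numbers input_sequence → Spec_find_missing_palindrome_numbers input_sequence (find_missing_palindrome_numbers input_sequence)

-- ===== LEMMAS AND PROOFS =====

-- ---- A-side: A returns the reversed prefix before the first palindromic suffix ----

-- a list equals its reverse iff every front-half element equals its mirror
lemma pvPal_iff (t : List Int) :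
    t.reverse = t ↔ ∀ i : Nat, (h : 2*i+1 < t.length) →
      t[i]'(by omega) = t[t.length-1-i]'(by omega) := by
  constructor
  · intro hp i h
    rw [List.getElem_of_eq hp.symm (by omega), List.getElem_reverse]
  · intro hp
    apply List.ext_getElem (by simp)
    intro i h1 h2
    rw [List.getElem_reverse]
    rcases lt_trichotomy (2*i+1) t.length with hc|hc|hc
    · exact (hp i hc).symm
    · exact getElem_congr_idx (by omega)
    · have h3 : 2*(t.length-1-i)+1 < t.length := by omega
      have h4 := hp (t.length-1-i) h3
      rw [getElem_congr_idx (show t.length-1-(t.length-1-i) = i by omega)] at h4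
      exact h4

-- characterization of A's inner loop from position s+j
lemma pvInner_char (seq : List Int) (s : Nat) (hs : s ≤ seq.length) :
    ∀ f j : Nat, seq.length - s - j ≤ f →
      (pvAInner seq seq.length s ((s:Int)+(j:Int)) = true ↔
        ∀ i : Nat, j ≤ i → (h : 2*i+1 < seq.length - s) →
          seq[s+i]'(by omega) = seq[seq.length-1-i]'(by omega)) := by
  intro f
  induction f with
  | zero =>
    intro j hj
    rw [pvAInner]
    have hge : ¬ ((s:Int)+(j:Int) < (seq.length:Int)) := by omega
    rw [dif_neg hge]
    constructor
    · intro _ i hji h; omega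
    · intro _; rfl
  | succ f ih =>
    intro j hj
    rw [pvAInner]
    by_cases hlt : (s:Int)+(j:Int) < (seq.length:Int)
    · rw [dif_pos hlt]
      by_cases hbr : (s:Int)+(j:Int) ≥ (seq.length:Int) - ((s:Int)+(j:Int)) + (s:Int) - 1
      · rw [if_pos hbr]
        constructor
        · intro _ i hji h; omega
        · intro _; rfl
      · rw [if_neg hbr]
        have hjm : 2*j+1 < seq.length - s := by omega
        have hidx1 : PySem.List.pyGetD seq ((s:Int)+(j:Int)) 0 = seq[s+j]'(by omega) := by
          rw [show (s:Int)+(j:Int) = ((s+j : Nat) : Int) by push_cast; ring]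
          rw [PySem.List.pyGetD_natCast, List.getD_eq_getElem _ _ (by omega)]
        have hidx2 : PySem.List.pyGetD seq ((seq.length:Int) - ((s:Int)+(j:Int)) + (s:Int) - 1) 0
            = seq[seq.length-1-j]'(by omega) := by
          rw [show (seq.length:Int) - ((s:Int)+(j:Int)) + (s:Int) - 1 = ((seq.length-1-j : Nat) : Int) by omega]
          rw [PySem.List.pyGetD_natCast, List.getD_eq_getElem _ _ (by omega)]
        rw [hidx1, hidx2]
        by_cases hne : seq[s+j]'(by omega) = seq[seq.length-1-j]'(by omega)
        · rw [if_neg (not_not_intro hne)]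
          rw [show (s:Int)+(j:Int)+1 = (s:Int)+((j+1:Nat):Int) by push_cast; ring]
          rw [ih (j+1) (by omega)]
          constructor
          · intro hall i hji h
            rcases Nat.eq_or_lt_of_le hji with rfl | hlt'
            · exact hne
            · exact hall i hlt' h
          · intro hall i hji h
            exact hall i (by omega) h
        · rw [if_pos hne]
          constructor
          · intro hfalse; exact absurd hfalse (by simp)
          · intro hall
            exact absurd (hall j le_rfl hjm) hne
    · rw [dif_neg hlt]
      constructor
      · intro _ i hji h; omega
      · intro _; rfl

-- A's palindrome test at start s decides whether seq[s:] equals its reversal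
lemma pvCond_iff (seq : List Int) (s : Nat) (hs : s ≤ seq.length) :
    pvAInner seq seq.length s (s:Int) = true ↔ (seq.drop s) = (seq.drop s).reverse := by
  have h := pvInner_char seq s hs (seq.length) 0 (by omega)
  rw [show (s:Int)+((0:Nat):Int) = (s:Int) by push_cast; ring] at h
  rw [h, eq_comm, pvPal_iff]
  constructor
  · intro hall i hi
    have hlen : (seq.drop s).length = seq.length - s := by simp
    have hi' : 2*i+1 < seq.length - s := by omega
    have := hall i (Nat.zero_le _) hi'
    simp only [List.getElem_drop]
    rw [getElem_congr_idx (show s + ((seq.drop s).length - 1 - i) = seq.length - 1 - i by simp; omega)]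
    exact this
  · intro hall i _ hi
    have hlen : (seq.drop s).length = seq.length - s := by simp
    have hi' : 2*i+1 < (seq.drop s).length := by omega
    have := hall i hi'
    simp only [List.getElem_drop] at this
    rw [getElem_congr_idx (show s + ((seq.drop s).length - 1 - i) = seq.length - 1 - i by simp; omega)] at this
    exact this

-- A's back-to-front append loop builds the reversed prefix
lemma pvOut_eq (seq : List Int) (s : Nat) (hs : s ≤ seq.length) :
    (PySem.List.pyRange 0 (s:Int) 1).foldl
      (fun acc idx => acc ++ [PySem.List.pyGetD seq ((s:Int) - 1 - idx) 0]) []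
    = (seq.take s).reverse := by
  rw [PySem.List.foldl_append_singleton_eq_map]
  rw [PySem.List.pyRange_zero_natCast]
  rw [List.map_map]
  apply List.ext_getElem (by simp; omega)
  intro i h1 h2
  simp only [List.nil_append] at h1 ⊢
  rw [List.getElem_map, List.getElem_range]
  simp only [Function.comp]
  have hi : i < s := by simpa using h1
  rw [show (s:Int) - 1 - ((i:Nat):Int) = ((s-1-i : Nat) : Int) by omega]
  rw [PySem.List.pyGetD_natCast, List.getD_eq_getElem _ _ (by omega)]
  rw [List.getElem_reverse]
  simp only [List.getElem_take]
  exact getElem_congr_idx (by simp; omega)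

-- the least start index whose suffix is a palindrome (exists: the empty suffix)
def pvSA (seq : List Int) : Nat :=
  Nat.find (show ∃ s, seq.drop s = (seq.drop s).reverse from ⟨seq.length, by simp⟩)

lemma pvSA_spec (seq : List Int) : seq.drop (pvSA seq) = (seq.drop (pvSA seq)).reverse :=
  Nat.find_spec (show ∃ s, seq.drop s = (seq.drop s).reverse from ⟨seq.length, by simp⟩)

lemma pvSA_min (seq : List Int) {s : Nat} (h : seq.drop s = (seq.drop s).reverse) :
    pvSA seq ≤ s :=
  Nat.find_min' (show ∃ s, seq.drop s = (seq.drop s).reverse from ⟨seq.length, by simp⟩) h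

lemma pvSA_le (seq : List Int) : pvSA seq ≤ seq.length :=
  pvSA_min seq (by simp)

lemma pvSA_lt (seq : List Int) (h : seq ≠ []) : pvSA seq < seq.length := by
  have hpos : 0 < seq.length := List.length_pos_of_ne_nil h
  have h1 : (seq.drop (seq.length - 1)).length = 1 := by
    rw [List.length_drop]; omega
  obtain ⟨a, ha⟩ := List.length_eq_one_iff.mp h1
  have hpal : seq.drop (seq.length - 1) = (seq.drop (seq.length - 1)).reverse := by
    rw [ha]; rfl
  have := pvSA_min seq hpal
  omega

lemma pvA_char (seq : List Int) :
    find_missing_palindrome_numbers seq = (seq.take (pvSA seq)).reverse := by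
  unfold find_missing_palindrome_numbers
  rcases eq_or_ne seq [] with rfl | hne
  · rw [pvAOuter]
    simp
  · have hsl := pvSA_lt seq hne
    suffices h : ∀ gas s : Nat, pvSA seq - s ≤ gas → s ≤ pvSA seq →
        pvAOuter seq seq.length (s:Int) = (seq.take (pvSA seq)).reverse by
      have := h (pvSA seq) 0 (by omega) (by omega)
      simpa using this
    intro gas
    induction gas with
    | zero =>
      intro s hgas hs
      have hseq : s = pvSA seq := by omega
      have hpal : seq.drop s = (seq.drop s).reverse := by rw [hseq]; exact pvSA_spec seq
      rw [pvAOuter, dif_pos (show (s:Int) < (seq.length:Int) by exact_mod_cast hseq ▸ hsl)]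
      rw [if_pos ((pvCond_iff seq s (by omega)).2 hpal)]
      rw [pvOut_eq seq s (by omega), hseq]
    | succ gas ih =>
      intro s hgas hs
      rcases eq_or_lt_of_le hs with heq | hlt2
      · have hpal : seq.drop s = (seq.drop s).reverse := by rw [heq]; exact pvSA_spec seq
        rw [pvAOuter, dif_pos (show (s:Int) < (seq.length:Int) by exact_mod_cast heq ▸ hsl)]
        rw [if_pos ((pvCond_iff seq s (by omega)).2 hpal)]
        rw [pvOut_eq seq s (by omega), heq]
      · rw [pvAOuter, dif_pos (show (s:Int) < (seq.length:Int) by exact_mod_cast (by omega : s < seq.length))]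
        have hnot : ¬ pvAInner seq seq.length s (s:Int) = true := by
          rw [pvCond_iff seq s (by omega)]
          intro hpal
          have := pvSA_min seq hpal
          omega
        rw [if_neg hnot]
        rw [show (s:Int)+1 = ((s+1:Nat):Int) by push_cast; ring]
        exact ih (s+1) (by omega) (by omega)

-- ---- KMP-side: borders of prefixes and the failure function ----

-- 'k is a (proper) border of the length-p prefix of c'
def pvBordb (c : List (Option Int)) (p k : Nat) : Bool :=
  decide (k < p) && decide (List.take k c = List.drop (p - k) (List.take p c))

lemma pvBordb_iff (c : List (Option Int)) (p k : Nat) :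
    pvBordb c p k = true ↔ (k < p ∧ List.take k c = List.drop (p - k) (List.take p c)) := by
  simp [pvBordb]

lemma pvBord_zero (c : List (Option Int)) (p : Nat) (hp : 1 ≤ p) :
    pvBordb c p 0 = true := by
  rw [pvBordb_iff]
  refine ⟨hp, ?_⟩
  rw [List.take_zero, Nat.sub_zero]
  exact (List.drop_eq_nil_of_le (by simp)).symm

lemma pvBord_succ (c : List (Option Int)) (p k : Nat) (hp : p < c.length) :
    pvBordb c (p+1) (k+1) = true ↔
      (pvBordb c p k = true ∧ c.getD k none = c.getD p none) := by
  rw [pvBordb_iff, pvBordb_iff]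
  by_cases hk : k < p
  · have hkl : k < c.length := lt_trans hk hp
    rw [List.take_succ_eq_append_getElem hkl, List.take_succ_eq_append_getElem hp]
    rw [show p + 1 - (k + 1) = p - k by omega]
    rw [List.drop_append_of_le_length (by rw [List.length_take]; omega)]
    rw [List.getD_eq_getElem c none hkl, List.getD_eq_getElem c none hp]
    constructor
    · rintro ⟨-, heq⟩
      have h2 := List.append_inj' heq rfl
      exact ⟨⟨hk, h2.1⟩, List.singleton_injective h2.2⟩
    · rintro ⟨⟨-, heq⟩, hmatch⟩
      exact ⟨by omega, by rw [heq, hmatch]⟩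
  · constructor
    · rintro ⟨h1, -⟩; exact absurd (by omega : k < p) hk
    · rintro ⟨⟨h1, -⟩, -⟩; exact absurd h1 hk

lemma pvBord_trans (c : List (Option Int)) (p k j : Nat)
    (h1 : pvBordb c p k = true) (h2 : pvBordb c k j = true) : pvBordb c p j = true := by
  rw [pvBordb_iff] at h1 h2 ⊢
  refine ⟨by omega, ?_⟩
  rw [h2.2, h1.2, List.drop_drop]
  congr 1
  omega

lemma pvBord_between (c : List (Option Int)) (p k j : Nat) (hjk : j < k)
    (h1 : pvBordb c p k = true) (h2 : pvBordb c p j = true) : pvBordb c k j = true := by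
  rw [pvBordb_iff] at h1 h2 ⊢
  refine ⟨hjk, ?_⟩
  rw [h1.2, List.drop_drop, h2.2]
  congr 1
  omega

-- the longest proper border of the length-p prefix
def pvF (c : List (Option Int)) (p : Nat) : Nat :=
  Nat.findGreatest (fun k => pvBordb c p k = true) (p - 1)

lemma pvF_bord (c : List (Option Int)) (p : Nat) (hp : 1 ≤ p) :
    pvBordb c p (pvF c p) = true := by
  unfold pvF
  refine Nat.findGreatest_spec (P := fun k => pvBordb c p k = true) (m := 0) (Nat.zero_le _) ?_
  exact pvBord_zero c p hp

lemma pvF_lt (c : List (Option Int)) (p : Nat) (hp : 1 ≤ p) : pvF c p < p := by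
  have := Nat.findGreatest_le (P := fun k => pvBordb c p k = true) (n := p - 1)
  unfold pvF
  omega

lemma pvF_max (c : List (Option Int)) (p k : Nat) (h : pvBordb c p k = true) :
    k ≤ pvF c p := by
  have hk : k < p := ((pvBordb_iff c p k).1 h).1
  unfold pvF
  refine Nat.le_findGreatest (P := fun k => pvBordb c p k = true) (by omega) ?_
  exact h

-- getD after set
lemma pvGetD_set (l : List Int) (i : Nat) (v : Int) (j : Nat) (h : i < l.length) :
    (l.set i v).getD j 0 = if j = i then v else l.getD j 0 := by
  unfold List.getD
  rw [List.getElem?_set]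
  by_cases h1 : i = j
  · subst h1; simp [h]
  · rw [if_neg h1, if_neg (fun hh => h1 hh.symm)]

-- the while loop lands on the longest border of prefix p that is followed by c[p] (or 0)
lemma pvShrink_spec (c : List (Option Int)) (fail : List Int) (p : Nat)
    (hfail : ∀ j : Nat, j < p → fail.getD j 0 = ((pvF c (j+1) : Nat) : Int)) :
    ∀ fuel k : Nat, k ≤ fuel → pvBordb c p k = true →
    ∃ r : Nat, pvShrink fail c (c.getD p none) (k : Int) fuel = (r : Int) ∧
      pvBordb c p r = true ∧
      (r = 0 ∨ c.getD r none = c.getD p none) ∧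
      (∀ j : Nat, pvBordb c p j = true → c.getD j none = c.getD p none → j ≤ k → j ≤ r) := by
  intro fuel
  induction fuel with
  | zero =>
    intro k hk hb
    have hk0 : k = 0 := by omega
    subst hk0
    exact ⟨0, rfl, hb, Or.inl rfl, fun j _ _ hj => by omega⟩
  | succ fuel ih =>
    intro k hk hb
    simp only [pvShrink]
    by_cases hcond : 0 < (k:Int) ∧ PySem.List.pyGetD c (k:Int) none ≠ c.getD p none
    · rw [if_pos hcond]
      have hk1 : 1 ≤ k := by
        have := hcond.1; omega
      have hkp : k < p := ((pvBordb_iff c p k).1 hb).1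
      have hidx : PySem.List.pyGetD fail ((k:Int) - 1) 0 = ((pvF c k : Nat) : Int) := by
        rw [show (k:Int) - 1 = ((k-1 : Nat) : Int) by omega, PySem.List.pyGetD_natCast]
        rw [hfail (k-1) (by omega)]
        congr 2
        omega
      rw [hidx]
      have hb' : pvBordb c p (pvF c k) = true :=
        pvBord_trans c p k (pvF c k) hb (pvF_bord c k hk1)
      have hflt : pvF c k < k := pvF_lt c k hk1
      obtain ⟨r, hr, hrb, hrx, hrmax⟩ := ih (pvF c k) (by omega) hb'
      refine ⟨r, hr, hrb, hrx, ?_⟩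
      intro j hjb hjx hjk
      have hne : j ≠ k := by
        intro hjeq; subst hjeq
        exact hcond.2 (by rw [PySem.List.pyGetD_natCast]; exact hjx)
      have hbet : pvBordb c k j = true := pvBord_between c p k j (by omega) hb hjb
      exact hrmax j hjb hjx (pvF_max c k j hbet)
    · rw [if_neg hcond]
      refine ⟨k, rfl, hb, ?_, fun j _ _ hj => hj⟩
      by_cases hk0 : k = 0
      · exact Or.inl hk0
      · right
        have h2 : ¬ (PySem.List.pyGetD c (k:Int) none ≠ c.getD p none) :=
          fun hne => hcond ⟨by omega, hne⟩
        rw [PySem.List.pyGetD_natCast] at h2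
        exact not_not.mp h2

-- one loop iteration computes the next failure value
lemma pvStepK_eq (c : List (Option Int)) (fail : List Int) (p : Nat)
    (hp1 : 1 ≤ p) (hp : p < c.length)
    (hfail : ∀ j : Nat, j < p → fail.getD j 0 = ((pvF c (j+1) : Nat) : Int)) :
    pvStepK c fail ((pvF c p : Nat) : Int) p = ((pvF c (p+1) : Nat) : Int) := by
  obtain ⟨r, hr, hrb, hrx, hrmax⟩ :=
    pvShrink_spec c fail p hfail (pvF c p) (pvF c p) le_rfl (pvF_bord c p hp1)
  simp only [pvStepK, PySem.List.pyGetD_natCast, Int.toNat_natCast]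
  rw [show (c.getD ((p:Nat)) none) = c.getD p none from rfl] at *
  rw [show pvShrink fail c (List.getD c p none) ((pvF c p : Nat) : Int) (pvF c p) = (r : Int) from hr]
  rw [PySem.List.pyGetD_natCast]
  by_cases hmatch : c.getD r none = c.getD p none
  · rw [if_pos hmatch]
    have hb1 : pvBordb c (p+1) (r+1) = true := (pvBord_succ c p r hp).2 ⟨hrb, hmatch⟩
    have hle : r + 1 ≤ pvF c (p+1) := pvF_max c (p+1) (r+1) hb1
    have hge : pvF c (p+1) ≤ r + 1 := by
      have hmb : pvBordb c (p+1) (pvF c (p+1)) = true := pvF_bord c (p+1) (by omega)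
      rcases Nat.eq_zero_or_pos (pvF c (p+1)) with h0 | hpos
      · omega
      · obtain ⟨m', hm'⟩ : ∃ m', pvF c (p+1) = m' + 1 := ⟨pvF c (p+1) - 1, by omega⟩
        rw [hm'] at hmb
        have hd := (pvBord_succ c p m' hp).1 hmb
        have h2 : m' ≤ r := hrmax m' hd.1 hd.2 (pvF_max c p m' hd.1)
        omega
    have heq : pvF c (p+1) = r + 1 := le_antisymm hge hle
    rw [heq]
    push_cast
    ring
  · rw [if_neg hmatch]
    have hr0 : r = 0 := by
      rcases hrx with h | h
      · exact h
      · exact absurd h hmatch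
    subst hr0
    have hF0 : pvF c (p+1) = 0 := by
      by_contra hne
      obtain ⟨m', hm'⟩ : ∃ m', pvF c (p+1) = m' + 1 := ⟨pvF c (p+1) - 1, by omega⟩
      have hmb : pvBordb c (p+1) (pvF c (p+1)) = true := pvF_bord c (p+1) (by omega)
      rw [hm'] at hmb
      have hd := (pvBord_succ c p m' hp).1 hmb
      have h2 : m' ≤ 0 := hrmax m' hd.1 hd.2 (pvF_max c p m' hd.1)
      have hm0 : m' = 0 := by omega
      subst hm0
      exact hmatch hd.2
    rw [hF0]

lemma pvKmp_spec (c : List (Option Int)) :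
    ∀ gas i : Nat, c.length - i ≤ gas → 1 ≤ i → ∀ fail : List Int, fail.length = c.length →
    (∀ j : Nat, j < i → fail.getD j 0 = ((pvF c (j+1) : Nat) : Int)) →
    ∀ j : Nat, j < c.length →
      (pvKmp c fail ((pvF c i : Nat) : Int) i).getD j 0 = ((pvF c (j+1) : Nat) : Int) := by
  intro gas
  induction gas with
  | zero =>
    intro i hgas hi fail hlen hinv j hj
    rw [pvKmp, dif_neg (by omega : ¬ i < c.length)]
    exact hinv j (by omega)
  | succ gas ih =>
    intro i hgas hi fail hlen hinv j hj
    rw [pvKmp]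
    by_cases hlt : i < c.length
    · rw [dif_pos hlt]
      have hstep : pvStepK c fail ((pvF c i : Nat) : Int) i = ((pvF c (i+1) : Nat) : Int) :=
        pvStepK_eq c fail i hi hlt (fun j' hj' => hinv j' hj')
      rw [hstep]
      refine ih (i+1) (by omega) (by omega) _ (by rw [List.length_set]; exact hlen) ?_ j hj
      intro j' hj'
      rw [pvGetD_set fail i _ j' (by omega)]
      by_cases hji : j' = i
      · subst hji; rw [if_pos rfl]
      · rw [if_neg hji]
        exact hinv j' (by omega)
    · rw [dif_neg hlt]
      exact hinv j (by omega)

-- ---- the combined word rev ++ [None] ++ seq ----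

def pvC (seq : List Int) : List (Option Int) :=
  seq.reverse.map some ++ [none] ++ seq.map some

lemma pvC_len (seq : List Int) : (pvC seq).length = 2 * seq.length + 1 := by
  simp [pvC]; omega

-- borders of the whole combined word of length ≤ n are exactly the palindromic suffixes
lemma pvBordN (seq : List Int) (k : Nat) (hk : k ≤ seq.length) :
    (pvBordb (pvC seq) ((pvC seq).length) k = true ↔
      seq.drop (seq.length - k) = (seq.drop (seq.length - k)).reverse) := by
  have h1 : List.take k (pvC seq) = ((seq.drop (seq.length - k)).reverse).map some := by
    unfold pvC
    rw [List.append_assoc, List.take_append_of_le_length (by simp [hk])]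
    rw [← List.map_take, List.take_reverse]
  have h2 : List.drop ((pvC seq).length - k) (List.take ((pvC seq).length) (pvC seq))
      = (seq.drop (seq.length - k)).map some := by
    rw [List.take_length]
    have h3 : (pvC seq).length - k = (seq.reverse.map some ++ [none]).length + (seq.length - k) := by
      rw [pvC_len]; simp; omega
    rw [h3]
    unfold pvC
    rw [List.drop_length_add_append, ← List.map_drop]
  rw [pvBordb_iff]
  constructor
  · rintro ⟨-, heq⟩
    rw [h1, h2] at heq
    exact (List.map_injective_iff.mpr (fun _ _ => Option.some.inj) heq).symm
  · intro hpal
    refine ⟨by rw [pvC_len]; omega, ?_⟩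
    rw [h1, h2, ← hpal]

-- no border of the combined word is longer than n (the separator blocks it)
lemma pvBordN_big (seq : List Int) (k : Nat) (hk1 : seq.length < k) :
    ¬ pvBordb (pvC seq) ((pvC seq).length) k = true := by
  rw [pvBordb_iff]
  rintro ⟨hklt, heq⟩
  rw [List.take_length] at heq
  rw [pvC_len] at hklt
  have hcn : (pvC seq)[seq.length]? = some none := by
    unfold pvC
    rw [List.getElem?_append_left (by simp), List.getElem?_append_right (by simp)]
    simp
  have hL : (List.take k (pvC seq))[seq.length]? = some none := by
    rw [List.getElem?_take_of_lt (by omega)]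
    exact hcn
  have hR : (List.drop ((pvC seq).length - k) (pvC seq))[seq.length]?
      = (pvC seq)[(pvC seq).length - k + seq.length]? := List.getElem?_drop ..
  have hidx : (pvC seq).length - k + seq.length
      = (seq.reverse.map some ++ [none]).length + (2 * seq.length - k) := by
    rw [pvC_len]; simp; omega
  have hRy : ∃ y, (pvC seq)[(pvC seq).length - k + seq.length]? = some (some y) := by
    have hb : 2 * seq.length - k < seq.length := by omega
    refine ⟨seq[2 * seq.length - k]'hb, ?_⟩
    rw [hidx]
    unfold pvC
    rw [List.getElem?_append_right (by omega), Nat.add_sub_cancel_left]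
    simp [List.getElem?_map, List.getElem?_eq_getElem hb]
  obtain ⟨y, hy⟩ := hRy
  have := congrArg (fun l => l[seq.length]?) heq
  simp only [hL, hR, hy] at this
  simp at this

lemma pvF_N (seq : List Int) :
    pvF (pvC seq) ((pvC seq).length) = seq.length - pvSA seq := by
  have hs_le : pvSA seq ≤ seq.length := pvSA_le seq
  have hN1 : 1 ≤ (pvC seq).length := by rw [pvC_len]; omega
  have h1 : pvBordb (pvC seq) ((pvC seq).length) (seq.length - pvSA seq) = true := by
    rw [pvBordN seq _ (by omega)]
    rw [show seq.length - (seq.length - pvSA seq) = pvSA seq by omega]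
    exact pvSA_spec seq
  have hub : seq.length - pvSA seq ≤ pvF (pvC seq) ((pvC seq).length) := pvF_max _ _ _ h1
  have hFb := pvF_bord (pvC seq) ((pvC seq).length) hN1
  have hFn : pvF (pvC seq) ((pvC seq).length) ≤ seq.length := by
    by_contra h
    exact pvBordN_big seq _ (by omega) hFb
  have h2 := (pvBordN seq _ hFn).1 hFb
  have h3 := pvSA_min seq h2
  omega

lemma pvKmp_len (c : List (Option Int)) :
    ∀ gas i : Nat, c.length - i ≤ gas → ∀ fail k, fail.length = c.length →
      (pvKmp c fail k i).length = c.length := by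
  intro gas
  induction gas with
  | zero =>
    intro i hgas fail k hlen
    rw [pvKmp, dif_neg (by omega : ¬ i < c.length)]
    exact hlen
  | succ gas ih =>
    intro i hgas fail k hlen
    rw [pvKmp]
    by_cases hlt : i < c.length
    · rw [dif_pos hlt]
      exact ih (i+1) (by omega) _ _ (by rw [List.length_set]; exact hlen)
    · rw [dif_neg hlt]; exact hlen

lemma pvB_char (seq : List Int) :
    find_missing_palindrome_numbers_alt seq = (seq.take (pvSA seq)).reverse := by
  show PySem.List.slice seq.reverse
      (some (PySem.List.pyGetD
        (pvKmp (pvC seq) (List.replicate ((pvC seq).length) 0) 0 1) (-1) 0)) none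
    = (seq.take (pvSA seq)).reverse
  set F := pvKmp (pvC seq) (List.replicate ((pvC seq).length) 0) 0 1 with hF
  have hN1 : 1 ≤ (pvC seq).length := by rw [pvC_len]; omega
  have hFlen : F.length = (pvC seq).length :=
    pvKmp_len (pvC seq) ((pvC seq).length) 1 (by omega) _ _ (by simp)
  have hinit0 : (0:Int) = ((pvF (pvC seq) 1 : Nat) : Int) := by
    have h0 : pvF (pvC seq) 1 = 0 := by unfold pvF; simp
    rw [h0]
    norm_num
  have hFval : F.getD ((pvC seq).length - 1) 0
      = ((pvF (pvC seq) ((pvC seq).length) : Nat) : Int) := by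
    rw [hF]
    have hsp := pvKmp_spec (pvC seq) ((pvC seq).length) 1 (by omega) (by omega)
      (List.replicate ((pvC seq).length) 0) (by simp)
      (fun j hj => by
        have hj0 : j = 0 := by omega
        subst hj0
        rw [← hinit0]
        simp [List.getD])
      ((pvC seq).length - 1) (by omega)
    rw [← hinit0] at hsp
    rw [hsp]
    congr 2
    omega
  have hFne : F ≠ [] := by
    intro h
    rw [h] at hFlen
    simp at hFlen
    omega
  have hlast : PySem.List.pyGetD F (-1) 0 = F.getD ((pvC seq).length - 1) 0 := by
    rw [PySem.List.pyGetD_neg_one F 0 hFne, List.getLast_eq_getElem,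
        List.getD_eq_getElem F 0 (by rw [hFlen]; omega)]
    exact getElem_congr_idx (by rw [hFlen])
  rw [hlast, hFval, PySem.List.slice_from_natCast, pvF_N]
  rw [List.drop_reverse]
  rw [show seq.length - (seq.length - pvSA seq) = pvSA seq by have := pvSA_le seq; omega]

-- ===== VERDICT (by name: the statement is the Claim_ definition above) =====
theorem find_missing_palindrome_numbers_spec : Claim_equal_find_missing_palindrome_numbers := by
  intro seq _dom
  unfold Spec_find_missing_palindrome_numbers
  rw [pvA_char, pvB_char]
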